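-- pv_equiv track=rewrite | github.com/beatprohalo/real-convert-pro | audio_analyzer.py | _generate_qa_recommendation
-- ===== SOURCE A (Python) =====
-- from typing import Dict, List, Tuple, Optional, Any, Callable
--
-- def _generate_qa_recommendation(issues: List[str], warnings: List[str]) -> str:
--     """Generate recommendation based on QA results"""
--     if not issues and not warnings:
--         return "Audio quality is excellent. No issues detected."
--
--     recommendations = []
--
--     if any("clipped" in issue.lower() for issue in issues):
--         recommendations.append("Re-master with lower input levels to avoid clipping")
--
--     if any("dc offset" in issue.lower() for issue in issues):
--         recommendations.append("Apply DC offset removal filter")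
--
--     if any("headroom" in warning.lower() for warning in warnings):
--         recommendations.append("Leave more headroom for mastering (aim for -6dB to -3dB peaks)")
--
--     if any("compressed" in warning.lower() for warning in warnings):
--         recommendations.append("Consider reducing compression to preserve dynamic range")
--
--     if any("frequency" in warning.lower() for warning in warnings):
--         recommendations.append("Review EQ settings for better frequency balance")
--
--     if any("distortion" in warning.lower() for warning in warnings):
--         recommendations.append("Check for overdriven input stages or excessive processing")
--
--     if not recommendations:
--         recommendations.append("Review and address the detected issues")
--
--     return "; ".join(recommendations)
-- ===== SOURCE B (Python) =====
-- def _generate_qa_recommendation(issues, warnings):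
--     """Single pass over the data: lowercase each string once, accumulate match flags,
--     then emit the messages for the flags that fired."""
--     if not issues and not warnings:
--         return "Audio quality is excellent. No issues detected."
--     clipped = dc = head = comp = freq = dist = False
--     for s in issues:
--         t = s.lower()
--         clipped = clipped or "clipped" in t
--         dc = dc or "dc offset" in t
--     for s in warnings:
--         t = s.lower()
--         head = head or "headroom" in t
--         comp = comp or "compressed" in t
--         freq = freq or "frequency" in t
--         dist = dist or "distortion" in t
--     recs = [msg for flag, msg in (
--         (clipped, "Re-master with lower input levels to avoid clipping"),
--         (dc, "Apply DC offset removal filter"),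
--         (head, "Leave more headroom for mastering (aim for -6dB to -3dB peaks)"),
--         (comp, "Consider reducing compression to preserve dynamic range"),
--         (freq, "Review EQ settings for better frequency balance"),
--         (dist, "Check for overdriven input stages or excessive processing"),
--     ) if flag]
--     return "; ".join(recs or ["Review and address the detected issues"])
-- ===== Notes on version B (the rewrite author's own statement) =====
-- stated objective: faster
-- what changed: Inverts the traversal: instead of six separate any(...) scans of the lists (re-lowercasing every string for each keyword), B makes one pass over issues and one over warnings, lowercasing each string once and accumulating six boolean flags, then emits the messages whose flags fired.
import Mathlib
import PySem

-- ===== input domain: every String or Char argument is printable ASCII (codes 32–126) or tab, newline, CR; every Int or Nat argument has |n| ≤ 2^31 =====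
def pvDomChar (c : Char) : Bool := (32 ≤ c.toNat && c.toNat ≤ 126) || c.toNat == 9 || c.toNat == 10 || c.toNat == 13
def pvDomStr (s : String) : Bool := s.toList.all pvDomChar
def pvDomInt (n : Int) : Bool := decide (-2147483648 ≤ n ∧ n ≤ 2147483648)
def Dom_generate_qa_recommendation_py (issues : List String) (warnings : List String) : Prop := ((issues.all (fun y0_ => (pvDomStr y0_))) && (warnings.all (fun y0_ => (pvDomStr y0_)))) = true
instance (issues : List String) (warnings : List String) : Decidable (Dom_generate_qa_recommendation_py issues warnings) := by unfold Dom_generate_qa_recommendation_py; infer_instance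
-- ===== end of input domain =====

-- B replaces A's six per-rule any(...) scans with a single pass over the data that lowercases each string once and accumulates boolean flags (alternative decomposition; same asymptotic cost).


-- ===== PORT A =====
def generate_qa_recommendation_py (issues : List String) (warnings : List String) : String :=
  if issues.isEmpty && warnings.isEmpty then
    "Audio quality is excellent. No issues detected."
  else
    let recommendations : List String := []
    let recommendations := if issues.any (fun issue => PySem.Str.isIn "clipped" (PySem.Str.lower issue)) then recommendations ++ ["Re-master with lower input levels to avoid clipping"] else recommendations
    let recommendations := if issues.any (fun issue => PySem.Str.isIn "dc offset" (PySem.Str.lower issue)) then recommendations ++ ["Apply DC offset removal filter"] else recommendations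
    let recommendations := if warnings.any (fun warning => PySem.Str.isIn "headroom" (PySem.Str.lower warning)) then recommendations ++ ["Leave more headroom for mastering (aim for -6dB to -3dB peaks)"] else recommendations
    let recommendations := if warnings.any (fun warning => PySem.Str.isIn "compressed" (PySem.Str.lower warning)) then recommendations ++ ["Consider reducing compression to preserve dynamic range"] else recommendations
    let recommendations := if warnings.any (fun warning => PySem.Str.isIn "frequency" (PySem.Str.lower warning)) then recommendations ++ ["Review EQ settings for better frequency balance"] else recommendations
    let recommendations := if warnings.any (fun warning => PySem.Str.isIn "distortion" (PySem.Str.lower warning)) then recommendations ++ ["Check for overdriven input stages or excessive processing"] else recommendations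
    let recommendations := if recommendations.isEmpty then recommendations ++ ["Review and address the detected issues"] else recommendations
    PySem.Str.join "; " recommendations

-- ===== PORT B =====
-- single pass over issues: (clipped, dc) flags, lowering each string once
def pvScanIssues (acc : Bool × Bool) (issues : List String) : Bool × Bool :=
  issues.foldl (fun acc s =>
    let t := PySem.Str.lower s
    (acc.1 || PySem.Str.isIn "clipped" t, acc.2 || PySem.Str.isIn "dc offset" t)) acc

-- single pass over warnings: (head, comp, freq, dist) flags
def pvScanWarnings (acc : Bool × Bool × Bool × Bool) (warnings : List String) : Bool × Bool × Bool × Bool :=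
  warnings.foldl (fun acc s =>
    let t := PySem.Str.lower s
    (acc.1 || PySem.Str.isIn "headroom" t,
     acc.2.1 || PySem.Str.isIn "compressed" t,
     acc.2.2.1 || PySem.Str.isIn "frequency" t,
     acc.2.2.2 || PySem.Str.isIn "distortion" t)) acc

def generate_qa_recommendation_py_alt (issues : List String) (warnings : List String) : String :=
  if issues.isEmpty && warnings.isEmpty then
    "Audio quality is excellent. No issues detected."
  else
    let p := pvScanIssues (false, false) issues
    let q := pvScanWarnings (false, false, false, false) warnings
    let recs := ((([
        (p.1, "Re-master with lower input levels to avoid clipping"),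
        (p.2, "Apply DC offset removal filter"),
        (q.1, "Leave more headroom for mastering (aim for -6dB to -3dB peaks)"),
        (q.2.1, "Consider reducing compression to preserve dynamic range"),
        (q.2.2.1, "Review EQ settings for better frequency balance"),
        (q.2.2.2, "Check for overdriven input stages or excessive processing")
      ] : List (Bool × String)).filter (fun r => r.1)).map (fun r => r.2))
    PySem.Str.join "; " (if recs.isEmpty then ["Review and address the detected issues"] else recs)

-- ===== PRECONDITION & SPEC =====
def Spec_generate_qa_recommendation_py (issues : List String) (warnings : List String) (out : String) : Prop := out = generate_qa_recommendation_py_alt issues warnings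
instance (issues : List String) (warnings : List String) (out : String) : Decidable (Spec_generate_qa_recommendation_py issues warnings out) := by unfold Spec_generate_qa_recommendation_py; infer_instance

-- ===== CLAIM (what is proved, stated in full; the proofs are below) =====
def Claim_equal_generate_qa_recommendation_py : Prop := ∀ (issues : List String) (warnings : List String), Dom_generate_qa_recommendation_py issues warnings → Spec_generate_qa_recommendation_py issues warnings (generate_qa_recommendation_py issues warnings)

-- ===== LEMMAS AND PROOFS =====
theorem pvScanIssues_eq_any (issues : List String) : ∀ (a b : Bool),
    pvScanIssues (a, b) issues
      = (a || issues.any (fun s => PySem.Str.isIn "clipped" (PySem.Str.lower s)),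
         b || issues.any (fun s => PySem.Str.isIn "dc offset" (PySem.Str.lower s))) := by
  induction issues with
  | nil => intro a b; simp [pvScanIssues]
  | cons x xs ih =>
    intro a b
    simp only [pvScanIssues, List.foldl_cons, List.any_cons]
    rw [show (xs.foldl _ _ : Bool × Bool) = pvScanIssues _ xs from rfl, ih]
    simp [Bool.or_assoc]

theorem pvScanWarnings_eq_any (warnings : List String) : ∀ (a b c d : Bool),
    pvScanWarnings (a, b, c, d) warnings
      = (a || warnings.any (fun s => PySem.Str.isIn "headroom" (PySem.Str.lower s)),
         b || warnings.any (fun s => PySem.Str.isIn "compressed" (PySem.Str.lower s)),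
         c || warnings.any (fun s => PySem.Str.isIn "frequency" (PySem.Str.lower s)),
         d || warnings.any (fun s => PySem.Str.isIn "distortion" (PySem.Str.lower s))) := by
  induction warnings with
  | nil => intro a b c d; simp [pvScanWarnings]
  | cons x xs ih =>
    intro a b c d
    simp only [pvScanWarnings, List.foldl_cons, List.any_cons]
    rw [show (xs.foldl _ _ : Bool × Bool × Bool × Bool) = pvScanWarnings _ xs from rfl, ih]
    simp [Bool.or_assoc]

-- ===== VERDICT (by name: the statement is the Claim_ definition above) =====
theorem generate_qa_recommendation_py_spec : Claim_equal_generate_qa_recommendation_py := by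
  intro issues warnings _
  unfold Spec_generate_qa_recommendation_py generate_qa_recommendation_py generate_qa_recommendation_py_alt
  by_cases h : issues.isEmpty && warnings.isEmpty
  · simp only [h, if_true]
  · simp only [h, Bool.false_eq_true, if_false, pvScanIssues_eq_any, pvScanWarnings_eq_any,
      Bool.false_or, List.filter_cons, List.filter_nil]
    generalize issues.any (fun s => PySem.Str.isIn "clipped" (PySem.Str.lower s)) = b1
    generalize issues.any (fun s => PySem.Str.isIn "dc offset" (PySem.Str.lower s)) = b2
    generalize warnings.any (fun s => PySem.Str.isIn "headroom" (PySem.Str.lower s)) = b3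
    generalize warnings.any (fun s => PySem.Str.isIn "compressed" (PySem.Str.lower s)) = b4
    generalize warnings.any (fun s => PySem.Str.isIn "frequency" (PySem.Str.lower s)) = b5
    generalize warnings.any (fun s => PySem.Str.isIn "distortion" (PySem.Str.lower s)) = b6
    cases b1 <;> cases b2 <;> cases b3 <;> cases b4 <;> cases b5 <;> cases b6 <;> rfl
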